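-- pv_equiv track=rewrite | github.com/JohnDvorak/general-cryptanalysis | cryptanalysis.py | vigenere_split_substrings
-- ===== SOURCE A (Python) =====
-- def vigenere_split_substrings(ciphertext, keylength):
--     """ Splits the ciphertext into 'keylength' substrings and offsets
--     them as described in Homework 2 problem 2 """
--
--     substring_list = [''] * keylength
--     substring_index = 0
--     offset = 0
--
--     # split the ciphertext into substrings
--     for letter in ciphertext:
--         # offset the letter by which key iteration it is on
--         new_letter_value = ord(letter) - offset
--
--         # Can't use modulo, so put it back in range 65-90
--         while new_letter_value < 65:
--             new_letter_value += 26
--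
--         # add it to the list, continue
--         substring_list[substring_index] += chr(new_letter_value)
--         substring_index += 1
--         # If we've gone past the keylength, reset to 0 and increase offset
--         if substring_index == keylength:
--             substring_index = 0
--             offset += 1
--
--     return substring_list
-- ===== SOURCE B (Python) =====
-- def vigenere_split_substrings(ciphertext, keylength):
--     """ Splits the ciphertext into 'keylength' substrings and offsets
--     them as described in Homework 2 problem 2 """
--     result = []
--     for i in range(keylength):
--         chars = []
--         offset = 0
--         j = i
--         # walk every keylength-th character starting at position i;
--         # the walk number is exactly the offset to subtract
--         while j < len(ciphertext):
--             v = ord(ciphertext[j]) - offset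
--             while v < 65:
--                 v += 26
--             chars.append(chr(v))
--             offset += 1
--             j += keylength
--         result.append(''.join(chars))
--     return result
-- ===== Notes on version B (the rewrite author's own statement) =====
-- stated objective: alternative
-- what changed: A's single interleaved pass with a cycling substring index and offset counter is replaced by independent per-key-position scans, each walking every keylength-th character and using its walk number as the offset.
import Mathlib
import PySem

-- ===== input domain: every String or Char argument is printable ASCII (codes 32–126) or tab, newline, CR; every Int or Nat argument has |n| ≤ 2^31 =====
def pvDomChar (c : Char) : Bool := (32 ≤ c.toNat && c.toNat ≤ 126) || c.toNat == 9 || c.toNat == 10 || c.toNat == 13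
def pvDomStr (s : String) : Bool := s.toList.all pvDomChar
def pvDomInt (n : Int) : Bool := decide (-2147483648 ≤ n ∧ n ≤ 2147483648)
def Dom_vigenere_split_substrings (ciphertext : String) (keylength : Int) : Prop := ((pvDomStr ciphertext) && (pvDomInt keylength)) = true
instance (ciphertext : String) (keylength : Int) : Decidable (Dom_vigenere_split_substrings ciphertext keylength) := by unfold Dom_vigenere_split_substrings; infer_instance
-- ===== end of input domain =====

-- B replaces A's single interleaved pass (cycling substring index + offset counter)
-- by independent per-key-position walks over every keylength-th character; alternative
-- decomposition, same asymptotic cost.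


-- ===== PORT A =====
-- 'while new_letter_value < 65: new_letter_value += 26' (shared by both Pythons verbatim)
def pyWrap65 (v : Int) : Int :=
  if v < 65 then pyWrap65 (v + 26) else v
termination_by (65 - v).toNat
decreasing_by omega

-- 'chr(ord(letter) - offset)' after the wrap (the identical three lines of A and B)
def vssShift (c : Char) (off : Int) : Char :=
  Char.ofNat (pyWrap65 ((c.toNat : Int) - off)).toNat

-- A's single 'for letter in ciphertext' loop; substrings kept as List Char, mk'ed at return.
-- none = the IndexError of 'substring_list[substring_index]' (keylength ≤ 0, non-empty text).
def vssLoop (klen : Int) : List Char → List (List Char) → Nat → Int → Option (List (List Char))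
  | [], acc, _, _ => some acc
  | c :: rest, acc, idx, off =>
    match acc[idx]? with
    | none => none
    | some s =>
      let acc' := acc.set idx (s ++ [vssShift c off])
      if (idx : Int) + 1 = klen then vssLoop klen rest acc' 0 (off + 1)
      else vssLoop klen rest acc' (idx + 1) off

def vigenere_split_substrings (ciphertext : String) (keylength : Int) : List String :=
  ((vssLoop keylength ciphertext.toList (List.replicate keylength.toNat []) 0 0).getD []).map String.ofList

-- ===== PORT B =====
-- B's inner 'while j < len(ciphertext)' walk (the '1 ≤ k' in the guard only makes the
-- recursion total; Source B only runs it for i in range(keylength), i.e. with keylength ≥ 1)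
def vssWalk (L : List Char) (k : Nat) (j : Nat) (off : Int) : List Char :=
  if h : j < L.length ∧ 1 ≤ k then
    vssShift (L[j]'h.1) off :: vssWalk L k (j + k) (off + 1)
  else []
termination_by L.length - j
decreasing_by omega

def vigenere_split_substrings_alt (ciphertext : String) (keylength : Int) : List String :=
  (PySem.List.pyRange 0 keylength 1).map
    (fun i => String.ofList (vssWalk ciphertext.toList keylength.toNat i.toNat 0))

-- ===== PRECONDITION & SPEC =====
-- Pre_ excludes exactly the inputs on which A raises IndexError: keylength ≤ 0 with a
-- non-empty ciphertext ('substring_list' is then empty and 'substring_list[0]' fails).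
def Pre_vigenere_split_substrings (ciphertext : String) (keylength : Int) : Prop :=
  ciphertext = "" ∨ 1 ≤ keylength

instance (ciphertext : String) (keylength : Int) : Decidable (Pre_vigenere_split_substrings ciphertext keylength) := by
  unfold Pre_vigenere_split_substrings; infer_instance

def pvWitness_vigenere_split_substrings : String × Int := ("HELLOWORLD", 3)

def Spec_vigenere_split_substrings (ciphertext : String) (keylength : Int) (out : List String) : Prop := out = vigenere_split_substrings_alt ciphertext keylength
instance (ciphertext : String) (keylength : Int) (out : List String) : Decidable (Spec_vigenere_split_substrings ciphertext keylength out) := by unfold Spec_vigenere_split_substrings; infer_instance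

-- ===== CLAIM (what is proved, stated in full; the proofs are below) =====
def Claim_equal_vigenere_split_substrings : Prop := ∀ (ciphertext : String) (keylength : Int), Dom_vigenere_split_substrings ciphertext keylength → Pre_vigenere_split_substrings ciphertext keylength → Spec_vigenere_split_substrings ciphertext keylength (vigenere_split_substrings ciphertext keylength)


-- ===== LEMMAS AND PROOFS =====

-- what A's loop, started at key position idx with running offset off, appends to slot t
def vssExtra (k : Nat) : List Char → Nat → Int → Nat → List Char
  | [], _, _, _ => []
  | c :: rest, idx, off, t =>
    (if idx = t then [vssShift c off] else []) ++
    (if idx + 1 = k then vssExtra k rest 0 (off + 1) t else vssExtra k rest (idx + 1) off t)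

-- unfolding equation for vssWalk, usable with explicit arguments in rw
theorem vssWalk_eq (L : List Char) (k j : Nat) (off : Int) :
    vssWalk L k j off =
      if h : j < L.length ∧ 1 ≤ k then
        vssShift (L[j]'h.1) off :: vssWalk L k (j + k) (off + 1)
      else [] := by
  rw [vssWalk]

-- peel one full cycle (k characters) off vssExtra
theorem vssExtra_chunk (k : Nat) :
    ∀ (L : List Char) (idx : Nat) (off : Int) (t : Nat), idx < k → t < k →
      vssExtra k L idx off t =
        (if idx ≤ t then ((L[t - idx]?).map (fun c => vssShift c off)).toList else []) ++
          vssExtra k (L.drop (k - idx)) 0 (off + 1) t := by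
  intro L
  induction L with
  | nil =>
    intro idx off t _ _
    simp [vssExtra]
  | cons c rest ih =>
    intro idx off t hidx ht
    by_cases hlast : idx + 1 = k
    · have hdrop : (c :: rest).drop (k - idx) = rest := by
        have : k - idx = 1 := by omega
        simp [this]
      rw [vssExtra, if_pos hlast, hdrop]
      by_cases hte : idx = t
      · subst hte
        simp
      · have hnle : ¬ idx ≤ t := by omega
        simp [hte, hnle]
    · have hdrop : (c :: rest).drop (k - idx) = rest.drop (k - (idx + 1)) := by
        have : k - idx = (k - (idx + 1)) + 1 := by omega
        simp [this]
      rw [vssExtra, if_neg hlast, ih (idx + 1) off t (by omega) ht, hdrop]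
      by_cases hte : idx = t
      · subst hte
        have hnle : ¬ idx + 1 ≤ idx := by omega
        simp [hnle]
      · by_cases hle : idx ≤ t
        · have hle' : idx + 1 ≤ t := by omega
          have hidx2 : t - idx = (t - (idx + 1)) + 1 := by omega
          have hgt : (c :: rest)[t - idx]? = rest[t - (idx + 1)]? := by
            rw [hidx2]; simp
          simp [hte, hle, hle', hgt]
        · have hnle : ¬ idx + 1 ≤ t := by omega
          simp [hte, hle, hnle]

-- shifting the walk index by k is walking the k-dropped list
theorem vssWalk_shift (L : List Char) (k : Nat) :
    ∀ (d j : Nat) (off : Int), L.length - j ≤ d →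
      vssWalk L k (j + k) off = vssWalk (L.drop k) k j off := by
  intro d
  induction d with
  | zero =>
    intro j off hd
    rw [vssWalk_eq L k (j + k) off, vssWalk_eq (L.drop k) k j off]
    have h1 : ¬ (j + k < L.length ∧ 1 ≤ k) := by intro hcon; omega
    have h2 : ¬ (j < (L.drop k).length ∧ 1 ≤ k) := by
      intro hcon
      have := hcon.1
      simp at this
      omega
    rw [dif_neg h1, dif_neg h2]
  | succ d ih =>
    intro j off hd
    rw [vssWalk_eq L k (j + k) off, vssWalk_eq (L.drop k) k j off]
    by_cases hg : j + k < L.length ∧ 1 ≤ k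
    · have hg2 : j < (L.drop k).length ∧ 1 ≤ k := by
        refine ⟨?_, hg.2⟩
        simp
        omega
      rw [dif_pos hg, dif_pos hg2]
      have hget : (L.drop k)[j]'hg2.1 = L[j + k]'hg.1 := by
        rw [List.getElem_drop]
        congr 1
        omega
      rw [hget, ih (j + k) (off + 1) (by omega)]
    · have hg2 : ¬ (j < (L.drop k).length ∧ 1 ≤ k) := by
        intro hcon
        have := hcon.1
        simp at this
        exact hg ⟨by omega, hcon.2⟩
      rw [dif_neg hg, dif_neg hg2]

-- B's walk from position t computes exactly what A's loop appends to slot t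
theorem vssWalk_eq_extra (k : Nat) (hk : 1 ≤ k) :
    ∀ (n : Nat) (L : List Char) (off : Int) (t : Nat), L.length ≤ n → t < k →
      vssWalk L k t off = vssExtra k L 0 off t := by
  intro n
  induction n with
  | zero =>
    intro L off t hn ht
    cases L with
    | nil => rw [vssWalk_eq]; simp [vssExtra]
    | cons c rest => simp at hn
  | succ n ih =>
    intro L off t hn ht
    by_cases hL : L = []
    · subst hL; rw [vssWalk_eq]; simp [vssExtra]
    · have hlen : 1 ≤ L.length := List.length_pos_of_ne_nil hL
      have hdl : (L.drop k).length ≤ n := by simp; omega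
      rw [vssExtra_chunk k L 0 off t (by omega) ht]
      simp only [Nat.zero_le, if_pos, Nat.sub_zero]
      rw [vssWalk_eq L k t off]
      by_cases hin : t < L.length
      · rw [dif_pos ⟨hin, hk⟩]
        rw [vssWalk_shift L k L.length t (off + 1) (by omega)]
        rw [ih (L.drop k) (off + 1) t hdl ht]
        simp [List.getElem?_eq_getElem hin]
      · rw [dif_neg (by intro hcon; exact hin hcon.1)]
        rw [← ih (L.drop k) (off + 1) t hdl ht, vssWalk_eq (L.drop k) k t (off + 1)]
        have hnot : ¬ (t < (L.drop k).length ∧ 1 ≤ k) := by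
          intro hcon
          have := hcon.1
          simp at this
          omega
        rw [dif_neg hnot]
        simp [List.getElem?_eq_none (by omega : L.length ≤ t)]
-- the state invariant of A's loop
theorem vssLoop_inv (k : Nat) (hk : 1 ≤ k) :
    ∀ (L : List Char) (acc : List (List Char)) (idx : Nat) (off : Int),
      idx < k → acc.length = k →
      vssLoop (k : Int) L acc idx off =
        some ((List.range k).map (fun t => acc.getD t [] ++ vssExtra k L idx off t)) := by
  intro L
  induction L with
  | nil =>
    intro acc idx off hidx hacc
    rw [vssLoop]
    congr 1
    apply List.ext_getElem
    · simp [hacc]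
    · intro t h1 h2
      simp only [List.getElem_map, List.getElem_range, vssExtra, List.append_nil]
      rw [List.getD_eq_getElem?_getD, List.getElem?_eq_getElem (by omega)]
      rfl
  | cons c rest ih =>
    intro acc idx off hidx hacc
    rw [vssLoop]
    have hidx' : idx < acc.length := by omega
    rw [List.getElem?_eq_getElem hidx']
    simp only
    set s := acc[idx]'hidx' with hs
    set acc' := acc.set idx (s ++ [vssShift c off]) with hacc'
    have hacclen' : acc'.length = k := by simp [hacc', hacc]
    have hslot : ∀ t, t < k →
        acc'.getD t [] ++ (if idx + 1 = k then vssExtra k rest 0 (off + 1) t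
                            else vssExtra k rest (idx + 1) off t) =
        acc.getD t [] ++ vssExtra k (c :: rest) idx off t := by
      intro t ht
      rw [vssExtra]
      by_cases hte : idx = t
      · subst hte
        have : acc'.getD idx [] = s ++ [vssShift c off] := by
          rw [List.getD_eq_getElem?_getD, hacc', List.getElem?_set_self hidx']
          rfl
        rw [this]
        have : acc.getD idx [] = s := by
          rw [List.getD_eq_getElem?_getD, List.getElem?_eq_getElem hidx']
          rfl
        rw [this]
        simp
      · have : acc'.getD t [] = acc.getD t [] := by
          rw [List.getD_eq_getElem?_getD, List.getD_eq_getElem?_getD, hacc',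
            List.getElem?_set_ne (by omega)]
        rw [this]
        simp [hte]
    by_cases hlast : (idx : Int) + 1 = (k : Int)
    · rw [if_pos hlast]
      rw [ih acc' 0 (off + 1) (by omega) hacclen']
      congr 1
      apply List.map_congr_left
      intro t htm
      have ht : t < k := List.mem_range.mp htm
      have := hslot t ht
      rw [if_pos (by exact_mod_cast hlast)] at this
      exact this
    · rw [if_neg hlast]
      have hlast' : idx + 1 ≠ k := by intro h; apply hlast; exact_mod_cast congrArg (Nat.cast : Nat → Int) h
      rw [ih acc' (idx + 1) off (by omega) hacclen']
      congr 1
      apply List.map_congr_left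
      intro t htm
      have ht : t < k := List.mem_range.mp htm
      have := hslot t ht
      rw [if_neg hlast'] at this
      exact this

-- ===== VERDICT (by name: the statement is the Claim_ definition above) =====
theorem vigenere_split_substrings_spec : Claim_equal_vigenere_split_substrings := by
  intro ct kl _hdom hpre
  unfold Spec_vigenere_split_substrings
  by_cases hkl : 1 ≤ kl
  · -- keylength ≥ 1
    obtain ⟨k, hcast⟩ : ∃ k : ℕ, kl = (k : Int) :=
      ⟨kl.toNat, (Int.toNat_of_nonneg (by omega)).symm⟩
    subst hcast
    have hk : 1 ≤ k := by exact_mod_cast hkl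
    unfold vigenere_split_substrings vigenere_split_substrings_alt
    simp only [Int.toNat_natCast]
    rw [vssLoop_inv k hk ct.toList (List.replicate k []) 0 0 (by omega) (by simp)]
    rw [Option.getD_some, List.map_map]
    rw [PySem.List.pyRange_one 0 (k : Int)]
    simp only [Int.sub_zero, Int.toNat_natCast, List.map_map]
    apply List.map_congr_left
    intro t htm
    have ht : t < k := List.mem_range.mp htm
    simp only [Function.comp]
    have h1 : (List.replicate k ([] : List Char)).getD t [] = [] := by
      rw [List.getD_eq_getElem?_getD, List.getElem?_replicate, if_pos ht]
      rfl
    have h2 : ((0 : Int) + (t : Int)).toNat = t := by omega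
    rw [h1, List.nil_append, h2,
      vssWalk_eq_extra k hk ct.toList.length ct.toList 0 t le_rfl ht]
  · -- keylength ≤ 0: Pre_ forces ciphertext = ""
    have hct : ct = "" := by
      rcases hpre with h | h
      · exact h
      · omega
    subst hct
    unfold vigenere_split_substrings vigenere_split_substrings_alt
    have htl : ("" : String).toList = [] := by decide
    rw [htl, vssLoop, Option.getD_some]
    have hr : PySem.List.pyRange 0 kl 1 = [] := PySem.List.pyRange_one_eq_nil (by omega)
    rw [hr]
    have : kl.toNat = 0 := by omega
    simp [this]
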